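-- pv_equiv track=rewrite | github.com/superjisonic/GoDotYourself | opencv_webapp_lecture/cvlecture/opencv_webapp/main.py | pixel_avg
-- ===== SOURCE A (Python) =====
-- def pixel_avg(square, n):
--     r, g, b = 0, 0, 0
--     for x in range(n):
--         for y in range(n):
--             r += square[x][y][2]
--             g += square[x][y][1]
--             b += square[x][y][0]
--     r, g, b = r // (n * n), g // (n * n), b // (n * n)
--     return (r, g, b)
-- ===== SOURCE B (Python) =====
-- def _csum(pixels):
--     # balanced divide-and-conquer reduction of pixel triples (b, g, r)
--     if not pixels:
--         return (0, 0, 0)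
--     if len(pixels) == 1:
--         px = pixels[0]
--         return (px[0], px[1], px[2])
--     mid = len(pixels) // 2
--     b1, g1, r1 = _csum(pixels[:mid])
--     b2, g2, r2 = _csum(pixels[mid:])
--     return (b1 + b2, g1 + g2, r1 + r2)
--
-- def pixel_avg(square, n):
--     pixels = [square[x][y] for x in range(n) for y in range(n)]
--     b, g, r = _csum(pixels)
--     area = n * n
--     return (r // area, g // area, b // area)
-- ===== Notes on version B (the rewrite author's own statement) =====
-- stated objective: alternative
-- what changed: Replaces the fused nested-loop three-scalar-accumulator pass by flattening the block into one pixel list and summing the (b,g,r) channel triples with a balanced divide-and-conquer tree reduction (halving recursion) before the floor divisions.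
import Mathlib
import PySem

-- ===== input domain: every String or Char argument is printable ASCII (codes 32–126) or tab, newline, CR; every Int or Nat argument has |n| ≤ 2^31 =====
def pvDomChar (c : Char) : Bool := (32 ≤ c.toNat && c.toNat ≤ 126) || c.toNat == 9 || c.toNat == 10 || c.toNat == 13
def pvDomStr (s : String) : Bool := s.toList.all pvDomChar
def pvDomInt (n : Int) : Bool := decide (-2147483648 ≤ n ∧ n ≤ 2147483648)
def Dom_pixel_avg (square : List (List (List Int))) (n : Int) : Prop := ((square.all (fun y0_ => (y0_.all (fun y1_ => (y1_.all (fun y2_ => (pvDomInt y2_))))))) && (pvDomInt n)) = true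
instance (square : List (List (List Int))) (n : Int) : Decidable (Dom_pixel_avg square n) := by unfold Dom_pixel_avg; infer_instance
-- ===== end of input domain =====

-- B replaces A's fused nested-loop three-scalar-accumulator pass by flattening the block into
-- one pixel list and summing the (b,g,r) channel triples with a balanced divide-and-conquer
-- tree reduction before the floor divisions (alternative algorithm; same asymptotic cost).

-- ===== PORT A =====
def pixel_avg (square : List (List (List Int))) (n : Int) : Int × Int × Int :=
  let s := (PySem.List.pyRange 0 n 1).foldl (fun acc x =>
    (PySem.List.pyRange 0 n 1).foldl (fun acc y =>
      (acc.1   + PySem.List.pyGetD (PySem.List.pyGetD (PySem.List.pyGetD square x []) y []) 2 0,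
       acc.2.1 + PySem.List.pyGetD (PySem.List.pyGetD (PySem.List.pyGetD square x []) y []) 1 0,
       acc.2.2 + PySem.List.pyGetD (PySem.List.pyGetD (PySem.List.pyGetD square x []) y []) 0 0)) acc) ((0 : Int), (0 : Int), (0 : Int))
  (PySem.Int.floordiv s.1 (n * n), PySem.Int.floordiv s.2.1 (n * n), PySem.Int.floordiv s.2.2 (n * n))

-- ===== PORT B =====
-- _csum: balanced divide-and-conquer reduction of the pixel triples (b, g, r)
def pvCsum : List (List Int) → Int × Int × Int
  | [] => (0, 0, 0)
  | [px] => (PySem.List.pyGetD px 0 0, PySem.List.pyGetD px 1 0, PySem.List.pyGetD px 2 0)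
  | px1 :: px2 :: rest =>
    let l := px1 :: px2 :: rest
    let mid := l.length / 2
    let u := pvCsum (l.take mid)
    let v := pvCsum (l.drop mid)
    (u.1 + v.1, u.2.1 + v.2.1, u.2.2 + v.2.2)
termination_by l => l.length
decreasing_by
  · simp [List.length_take]; omega
  · simp [List.length_drop]; omega

def pixel_avg_alt (square : List (List (List Int))) (n : Int) : Int × Int × Int :=
  let pixels := (PySem.List.pyRange 0 n 1).flatMap (fun x =>
    (PySem.List.pyRange 0 n 1).map (fun y => PySem.List.pyGetD (PySem.List.pyGetD square x []) y []))
  let s := pvCsum pixels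
  let area := n * n
  (PySem.Int.floordiv s.2.2 area, PySem.Int.floordiv s.2.1 area, PySem.Int.floordiv s.1 area)

-- ===== PRECONDITION & SPEC =====
-- Pre_ excludes exactly the inputs on which the Python A raises: n = 0 (ZeroDivisionError)
-- and, for n > 0, squares whose first n rows / first n pixels per row / pixel channels 0..2
-- are not all present (IndexError). A returns on every other input (including n < 0).
def Pre_pixel_avg (square : List (List (List Int))) (n : Int) : Prop :=
  n ≠ 0 ∧ (0 < n →
    n ≤ (square.length : Int) ∧
    ∀ row ∈ square.take n.toNat,
      n ≤ (row.length : Int) ∧ ∀ px ∈ row.take n.toNat, 3 ≤ px.length)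
instance (square : List (List (List Int))) (n : Int) : Decidable (Pre_pixel_avg square n) := by unfold Pre_pixel_avg; infer_instance

def pvWitness_pixel_avg : List (List (List Int)) × Int :=
  ([[[1, 2, 3], [4, 5, 6]], [[7, 8, 9], [10, 11, 12]]], 2)

def Spec_pixel_avg (square : List (List (List Int))) (n : Int) (out : Int × Int × Int) : Prop := out = pixel_avg_alt square n
instance (square : List (List (List Int))) (n : Int) (out : Int × Int × Int) : Decidable (Spec_pixel_avg square n out) := by unfold Spec_pixel_avg; infer_instance

-- ===== CLAIM (what is proved, stated in full; the proofs are below) =====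
def Claim_equal_pixel_avg : Prop := ∀ (square : List (List (List Int))) (n : Int), Dom_pixel_avg square n → Pre_pixel_avg square n → Spec_pixel_avg square n (pixel_avg square n)

-- ===== LEMMAS AND PROOFS =====

-- the divide-and-conquer reduction computes the three channel sums
lemma pvCsum_eq_sums (l : List (List Int)) :
    pvCsum l = ((l.map (fun px => PySem.List.pyGetD px 0 0)).sum,
                (l.map (fun px => PySem.List.pyGetD px 1 0)).sum,
                (l.map (fun px => PySem.List.pyGetD px 2 0)).sum) := by
  fun_induction pvCsum l with
  | case1 => simp
  | case2 px => simp
  | case3 px1 px2 rest l mid u v ihT ihD =>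
    simp only [u, v, ihT, ihD, l, mid]
    have := List.take_append_drop ((px1 :: px2 :: rest).length / 2) (px1 :: px2 :: rest)
    conv_rhs => rw [← this]
    simp

-- folding over a flattened list = the nested fold
lemma foldl_flatMap_eq {α β σ : Type} (l : List α) (f : α → List β) (step : σ → β → σ) (init : σ) :
    (l.flatMap f).foldl step init = l.foldl (fun s a => (f a).foldl step s) init := by
  induction l generalizing init with
  | nil => rfl
  | cons a t ih => simp [List.flatMap_cons, List.foldl_append, ih]

-- the three-accumulator fold computes the three channel sums independently
lemma triple_fold_eq_sums {γ : Type} (xs : List γ) (f2 f1 f0 : γ → Int) :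
    ∀ (r g b : Int),
      xs.foldl (fun acc px => (acc.1 + f2 px, acc.2.1 + f1 px, acc.2.2 + f0 px)) (r, g, b)
        = (r + (xs.map f2).sum, g + (xs.map f1).sum, b + (xs.map f0).sum) := by
  induction xs with
  | nil => intro r g b; simp
  | cons x t ih => intro r g b; simp [ih]; refine ⟨by ring, by ring, by ring⟩

theorem pixel_avg_eq_alt (square : List (List (List Int))) (n : Int) :
    pixel_avg square n = pixel_avg_alt square n := by
  simp only [pixel_avg, pixel_avg_alt]
  have hinner : ∀ (x : Int) (acc : Int × Int × Int),
      (PySem.List.pyRange 0 n 1).foldl (fun acc y =>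
        (acc.1   + PySem.List.pyGetD (PySem.List.pyGetD (PySem.List.pyGetD square x []) y []) 2 0,
         acc.2.1 + PySem.List.pyGetD (PySem.List.pyGetD (PySem.List.pyGetD square x []) y []) 1 0,
         acc.2.2 + PySem.List.pyGetD (PySem.List.pyGetD (PySem.List.pyGetD square x []) y []) 0 0)) acc
      = ((PySem.List.pyRange 0 n 1).map
          (fun y => PySem.List.pyGetD (PySem.List.pyGetD square x []) y [])).foldl
          (fun acc px =>
            (acc.1   + PySem.List.pyGetD px 2 0,
             acc.2.1 + PySem.List.pyGetD px 1 0,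
             acc.2.2 + PySem.List.pyGetD px 0 0)) acc := by
    intro x acc; rw [List.foldl_map]
  simp only [hinner]
  rw [← foldl_flatMap_eq, triple_fold_eq_sums, pvCsum_eq_sums]
  simp [List.map_flatMap]

-- ===== VERDICT (by name: the statement is the Claim_ definition above) =====
theorem pixel_avg_spec : Claim_equal_pixel_avg := by
  intro square n _ _
  unfold Spec_pixel_avg
  exact pixel_avg_eq_alt square n
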